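-- pv_equiv track=rewrite | github.com/Ovler-Young/meiliisland | config_loader.py | translate_attributes
-- ===== SOURCE A (Python) =====
-- def translate_attributes(attrs: dict[str, list[str]]) -> dict[str, list[str]]:
--     """
--     Translate attribute configuration to MeiliSearch format.
--
--     Input:  {"id": ["filterable", "sortable"], "title": ["searchable"]}
--     Output: {"filterable_attributes": ["id"],
--              "sortable_attributes": ["id"],
--              "searchable_attributes": ["title"]}
--
--     Args:
--         attrs: Attribute dictionary from config
--
--     Returns:
--         MeiliSearch-compatible attribute configuration
--     """
--     result = {
--         "filterable_attributes": [],
--         "sortable_attributes": [],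
--         "searchable_attributes": []
--     }
--
--     for field_name, capabilities in attrs.items():
--         for capability in capabilities:
--             if capability == "filterable":
--                 result["filterable_attributes"].append(field_name)
--             elif capability == "sortable":
--                 result["sortable_attributes"].append(field_name)
--             elif capability == "searchable":
--                 result["searchable_attributes"].append(field_name)
--             else:
--                 raise ValueError(f"Unknown attribute capability: {capability}")
--
--     return result
-- ===== SOURCE B (Python) =====
-- def translate_attributes(attrs: dict[str, list[str]]) -> dict[str, list[str]]:
--     """Validate first, then build each bucket with its own comprehension."""
--     valid = {"filterable", "sortable", "searchable"}
--     for field_name, capabilities in attrs.items():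
--         for capability in capabilities:
--             if capability not in valid:
--                 raise ValueError(f"Unknown attribute capability: {capability}")
--     return {
--         "filterable_attributes": [f for f, caps in attrs.items() for c in caps if c == "filterable"],
--         "sortable_attributes": [f for f, caps in attrs.items() for c in caps if c == "sortable"],
--         "searchable_attributes": [f for f, caps in attrs.items() for c in caps if c == "searchable"],
--     }
-- ===== Notes on version B (the rewrite author's own statement) =====
-- stated objective: simpler
-- what changed: Replaces the single branching accumulation pass with an explicit validation pass followed by three independent per-capability comprehensions, one per output bucket.
import Mathlib
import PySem

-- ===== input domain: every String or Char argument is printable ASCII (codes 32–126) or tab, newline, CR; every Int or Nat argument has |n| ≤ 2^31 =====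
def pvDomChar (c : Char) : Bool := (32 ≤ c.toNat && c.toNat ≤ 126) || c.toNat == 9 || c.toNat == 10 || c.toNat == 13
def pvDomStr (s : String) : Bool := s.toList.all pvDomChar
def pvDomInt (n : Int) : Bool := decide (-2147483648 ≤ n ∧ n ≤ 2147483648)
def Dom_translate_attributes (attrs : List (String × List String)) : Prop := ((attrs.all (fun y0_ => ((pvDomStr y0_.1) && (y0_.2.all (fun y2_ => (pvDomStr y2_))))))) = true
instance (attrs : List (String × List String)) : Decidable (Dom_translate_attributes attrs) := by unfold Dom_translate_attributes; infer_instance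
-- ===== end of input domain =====

-- B replaces A's single branching accumulation pass by a validation pass plus three
-- independent per-capability comprehensions (objective: simpler).

-- ===== PORT A =====
-- result dict with the three buckets; the loop threads Option (none = ValueError raised)
def translate_attributes (attrs : List (String × List String)) : List (String × List String) :=
  let init : PySem.Dict String (List String) :=
    PySem.Dict.ofList [("filterable_attributes", []), ("sortable_attributes", []), ("searchable_attributes", [])]
  let res : Option (PySem.Dict String (List String)) := attrs.foldl
    (fun acc fc => fc.2.foldl
      (fun od c => od.bind (fun d =>
        if c = "filterable" then some (d.modify "filterable_attributes" [] (· ++ [fc.1]))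
        else if c = "sortable" then some (d.modify "sortable_attributes" [] (· ++ [fc.1]))
        else if c = "searchable" then some (d.modify "searchable_attributes" [] (· ++ [fc.1]))
        else none)) acc) (some init)
  match res with
  | some d => d.items
  | none => []   -- Python raises ValueError here; excluded by Pre_

-- ===== PORT B =====
-- one bucket = one comprehension: [f for f, caps in attrs for c in caps if c == cap]
def pvCollect (cap : String) (attrs : List (String × List String)) : List String :=
  attrs.flatMap (fun fc => (fc.2.filter (fun c => c = cap)).map (fun _ => fc.1))

def pvValidCap (c : String) : Bool :=
  c == "filterable" || c == "sortable" || c == "searchable"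

def translate_attributes_alt (attrs : List (String × List String)) : List (String × List String) :=
  if attrs.all (fun fc => fc.2.all pvValidCap) then
    [("filterable_attributes", pvCollect "filterable" attrs),
     ("sortable_attributes", pvCollect "sortable" attrs),
     ("searchable_attributes", pvCollect "searchable" attrs)]
  else []   -- Python raises ValueError here; excluded by Pre_

-- ===== PRECONDITION & SPEC =====
-- Pre_ excludes (a) inputs with an unknown capability, on which A raises ValueError, and
-- (b) assoc lists with duplicate field names, which a real Python dict cannot hold (the
-- dict silently collapses them while the ports iterate every entry).
def Pre_translate_attributes (attrs : List (String × List String)) : Prop :=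
  (attrs.map Prod.fst).Nodup ∧ (attrs.all (fun fc => fc.2.all pvValidCap)) = true
instance (attrs : List (String × List String)) : Decidable (Pre_translate_attributes attrs) := by
  unfold Pre_translate_attributes; infer_instance

def pvWitness_translate_attributes : (List (String × List String)) :=
  [("id", ["filterable", "sortable"]), ("title", ["searchable"])]

def Spec_translate_attributes (attrs : List (String × List String)) (out : List (String × List String)) : Prop := out = translate_attributes_alt attrs
instance (attrs : List (String × List String)) (out : List (String × List String)) : Decidable (Spec_translate_attributes attrs out) := by unfold Spec_translate_attributes; infer_instance

-- ===== CLAIM (what is proved, stated in full; the proofs are below) =====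
def Claim_equal_translate_attributes : Prop := ∀ (attrs : List (String × List String)), Dom_translate_attributes attrs → Pre_translate_attributes attrs → Spec_translate_attributes attrs (translate_attributes attrs)

-- ===== LEMMAS AND PROOFS =====

-- the result dict always has exactly these three entries
def pvMkRes (F S Se : List String) : PySem.Dict String (List String) :=
  PySem.Dict.mk [("filterable_attributes", F), ("sortable_attributes", S), ("searchable_attributes", Se)]

lemma pvModF (F S Se : List String) (x : String) :
    (pvMkRes F S Se).modify "filterable_attributes" [] (· ++ [x]) = pvMkRes (F ++ [x]) S Se := by
  simp [pvMkRes, PySem.Dict.modify, PySem.Dict.insert, PySem.Dict.getD, PySem.Dict.get?]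

lemma pvModS (F S Se : List String) (x : String) :
    (pvMkRes F S Se).modify "sortable_attributes" [] (· ++ [x]) = pvMkRes F (S ++ [x]) Se := by
  simp [pvMkRes, PySem.Dict.modify, PySem.Dict.insert, PySem.Dict.getD, PySem.Dict.get?]

lemma pvModSe (F S Se : List String) (x : String) :
    (pvMkRes F S Se).modify "searchable_attributes" [] (· ++ [x]) = pvMkRes F S (Se ++ [x]) := by
  simp [pvMkRes, PySem.Dict.modify, PySem.Dict.insert, PySem.Dict.getD, PySem.Dict.get?]

-- inner loop over one field's capabilities, when all are valid
lemma pvInner (name : String) (caps : List String) (F S Se : List String)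
    (h : caps.all pvValidCap = true) :
    caps.foldl
      (fun od c => od.bind (fun d =>
        if c = "filterable" then some (d.modify "filterable_attributes" [] (· ++ [name]))
        else if c = "sortable" then some (d.modify "sortable_attributes" [] (· ++ [name]))
        else if c = "searchable" then some (d.modify "searchable_attributes" [] (· ++ [name]))
        else none)) (some (pvMkRes F S Se))
    = some (pvMkRes (F ++ ((caps.filter (fun c => c = "filterable")).map (fun _ => name)))
                    (S ++ ((caps.filter (fun c => c = "sortable")).map (fun _ => name)))
                    (Se ++ ((caps.filter (fun c => c = "searchable")).map (fun _ => name)))) := by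
  induction caps generalizing F S Se with
  | nil => simp
  | cons c cs ih =>
    simp only [List.all_cons, Bool.and_eq_true] at h
    have hc := h.1
    simp only [List.foldl_cons, Option.bind_some]
    unfold pvValidCap at hc
    by_cases h1 : c = "filterable"
    · subst h1
      rw [if_pos rfl, pvModF, ih _ _ _ h.2]
      simp
    · by_cases h2 : c = "sortable"
      · subst h2
        rw [if_neg h1, if_pos rfl, pvModS, ih _ _ _ h.2]
        simp [h1]
      · have h3 : c = "searchable" := by
          simp only [Bool.or_eq_true, beq_iff_eq] at hc
          tauto
        subst h3
        rw [if_neg h1, if_neg h2, if_pos rfl, pvModSe, ih _ _ _ h.2]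
        simp [h1, h2]

-- outer loop invariant
lemma pvOuter (attrs : List (String × List String)) (F S Se : List String)
    (h : attrs.all (fun fc => fc.2.all pvValidCap) = true) :
    attrs.foldl
      (fun acc fc => fc.2.foldl
        (fun od c => od.bind (fun d =>
          if c = "filterable" then some (d.modify "filterable_attributes" [] (· ++ [fc.1]))
          else if c = "sortable" then some (d.modify "sortable_attributes" [] (· ++ [fc.1]))
          else if c = "searchable" then some (d.modify "searchable_attributes" [] (· ++ [fc.1]))
          else none)) acc) (some (pvMkRes F S Se))
    = some (pvMkRes (F ++ pvCollect "filterable" attrs)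
                    (S ++ pvCollect "sortable" attrs)
                    (Se ++ pvCollect "searchable" attrs)) := by
  induction attrs generalizing F S Se with
  | nil => simp [pvCollect]
  | cons fc rest ih =>
    simp only [List.all_cons, Bool.and_eq_true] at h
    simp only [List.foldl_cons]
    rw [pvInner fc.1 fc.2 F S Se h.1, ih _ _ _ h.2]
    simp [pvCollect, List.append_assoc]

-- ===== VERDICT (by name: the statement is the Claim_ definition above) =====
theorem translate_attributes_spec : Claim_equal_translate_attributes := by
  intro attrs _ hpre
  unfold Spec_translate_attributes translate_attributes translate_attributes_alt
  have hv := hpre.2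
  have hinit : PySem.Dict.ofList
      ([("filterable_attributes", []), ("sortable_attributes", []), ("searchable_attributes", [])] :
        List (String × List String)) = pvMkRes [] [] [] := by decide
  simp only [hinit, pvOuter attrs [] [] [] hv, hv, if_pos, List.nil_append]
  rfl
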